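-- pv_equiv track=rewrite | github.com/arsaikia/Data_Structures_and_Algorithms | prepalgo/Graphs/number-of-islands.py | numOfIslandsDFS
-- ===== SOURCE A (Python) =====
-- def numOfIslandsDFS(grid):
--     visited = [[False for num in row] for row in grid]
--     islands = []
--     for row in range(len(grid)):
--         for col in range(len(grid[0])):
--             if visited[row][col]:
--                 continue
--             size = traverseNodeDFS(row, col, grid, visited)
--             if size:
--                 islands.append(size)
--     return islands
--
-- def traverseNodeDFS(row, col, matrix, visited):
--
--     if (row not in range(len(matrix)) or col not in range(len(matrix[0])) or visited[row][col]):
--         return 0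
--
--     visited[row][col] = True
--
--     if matrix[row][col] == "0":
--         return 0
--     return (1 + traverseNodeDFS(row + 1, col, matrix, visited)
--             + traverseNodeDFS(row - 1, col, matrix, visited)
--             + traverseNodeDFS(row, col + 1, matrix, visited)
--             + traverseNodeDFS(row, col - 1, matrix, visited))
-- ===== SOURCE B (Python) =====
-- def numOfIslandsDFS(grid):
--     # Iterative flood fill with an explicit stack instead of A's recursive DFS.
--     visited = [[False] * len(row) for row in grid]
--     islands = []
--     rows = len(grid)
--     for r in range(rows):
--         for c in range(len(grid[0])):
--             size = 0
--             stack = [(r, c)]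
--             while stack:
--                 i, j = stack.pop()
--                 if not (0 <= i < rows) or not (0 <= j < len(grid[0])):
--                     continue
--                 if visited[i][j]:
--                     continue
--                 visited[i][j] = True
--                 if grid[i][j] == "0":
--                     continue
--                 size += 1
--                 stack.append((i, j - 1))
--                 stack.append((i, j + 1))
--                 stack.append((i - 1, j))
--                 stack.append((i + 1, j))
--             if size:
--                 islands.append(size)
--     return islands
-- ===== Notes on version B (the rewrite author's own statement) =====
-- stated objective: alternative
-- what changed: Replaces A's recursive four-way DFS helper with an iterative flood fill driven by an explicit stack (push the four neighbours, bounds/visited-check on pop), keeping the row-major outer scan.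
import Mathlib
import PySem

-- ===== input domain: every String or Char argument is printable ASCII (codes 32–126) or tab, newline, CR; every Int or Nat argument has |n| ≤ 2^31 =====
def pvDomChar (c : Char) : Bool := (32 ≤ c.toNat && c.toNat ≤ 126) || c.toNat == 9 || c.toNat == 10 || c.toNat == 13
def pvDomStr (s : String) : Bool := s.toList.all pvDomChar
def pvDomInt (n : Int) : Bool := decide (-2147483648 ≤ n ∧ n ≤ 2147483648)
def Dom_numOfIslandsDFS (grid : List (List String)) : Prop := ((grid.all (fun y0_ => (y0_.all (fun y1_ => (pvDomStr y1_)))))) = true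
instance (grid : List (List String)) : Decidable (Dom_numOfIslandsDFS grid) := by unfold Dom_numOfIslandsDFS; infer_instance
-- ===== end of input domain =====

-- B replaces A's recursive four-way DFS by an iterative explicit-stack flood fill (same row-major
-- outer scan); objective: alternative decomposition, same asymptotic cost. Python A mutates nothing
-- observable by the caller (visited is local).

-- shared low-level accessors (the Python subscript/assignment primitives both versions use)
-- visited[i][j] as an Option: none exactly where Python would raise IndexError (excluded by Pre_)
def entryV (v : List (List Bool)) (i j : Int) : Option Bool :=
  if 0 ≤ i ∧ 0 ≤ j then (v[i.toNat]?).bind (fun r => r[j.toNat]?) else none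

-- visited[i][j] = True (no-op out of range; in-range whenever entryV is some _)
def setTrue (v : List (List Bool)) (i j : Int) : List (List Bool) :=
  if 0 ≤ i ∧ 0 ≤ j then v.set i.toNat ((v.getD i.toNat []).set j.toNat true) else v

-- number of unvisited cells: the termination measure of both flood fills
def countF (v : List (List Bool)) : Nat := (v.map (fun r => r.count false)).sum

-- matrix[i][j]; only evaluated after the bounds checks (and inside Pre_) where it is exact
def cellAt (m : List (List String)) (i j : Int) : String :=
  (m.getD i.toNat []).getD j.toNat ""

-- termination lemmas cited by floodLoop's decreasing_by (proofs are self-contained)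

theorem count_set_true_lt (l : List Bool) (k : Nat) (h : l[k]? = some false) :
    (l.set k true).count false < l.count false := by
  induction l generalizing k with
  | nil => simp at h
  | cons a l ih =>
    cases k with
    | zero => simp_all
    | succ k =>
      have := ih k (by simpa using h)
      simp [List.count_cons]; omega



theorem countF_set_lt (v : List (List Bool)) (n m : Nat) (row : List Bool)
    (h : v[n]? = some row) (hf : row[m]? = some false) :
    countF (v.set n ((v.getD n []).set m true)) < countF v := by
  induction v generalizing n with
  | nil => simp at h
  | cons a v ih =>
    cases n with
    | zero =>
      have ha : a = row := by simpa using h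
      simp only [List.getD_cons_zero, List.set_cons_zero, countF, List.map_cons, List.sum_cons, ha]
      have := count_set_true_lt row m hf
      omega
    | succ n =>
      have := ih n (by simpa using h)
      simp only [List.getD_cons_succ, List.set_cons_succ, countF, List.map_cons, List.sum_cons]
      simp only [countF] at this
      omega

theorem countF_setTrue_lt (v : List (List Bool)) (i j : Int)
    (h : entryV v i j = some false) : countF (setTrue v i j) < countF v := by
  unfold entryV at h
  unfold setTrue
  split
  · rename_i hij
    rw [if_pos hij] at h
    cases hrow : v[i.toNat]? with
    | none => rw [hrow] at h; simp at h
    | some row =>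
      rw [hrow] at h
      simp only [Option.bind_some] at h
      exact countF_set_lt v i.toNat j.toNat row hrow h
  · rename_i hij
    rw [if_neg hij] at h
    simp at h

-- ===== PORT A =====
-- traverseNodeDFS, fuel-indexed: the fuel (countF v + 1 at the top call) is only a totality
-- guard; travF_congr below shows any fuel > countF v computes the same result.
def travF (m : List (List String)) : Nat → Int → Int → List (List Bool) → Int × List (List Bool)
  | 0, _, _, v => (0, v)
  | Nat.succ f, row, col, v =>
    if ¬(0 ≤ row ∧ row < (m.length : Int)) ∨ ¬(0 ≤ col ∧ col < ((m.headD []).length : Int)) then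
      (0, v)
    else
      match entryV v row col with
      | none => (0, v)        -- Python raises IndexError here; excluded by Pre_
      | some true => (0, v)
      | some false =>
        let v1 := setTrue v row col
        if cellAt m row col == "0" then (0, v1)
        else
          let p1 := travF m f (row + 1) col v1
          let p2 := travF m f (row - 1) col p1.2
          let p3 := travF m f row (col + 1) p2.2
          let p4 := travF m f row (col - 1) p3.2
          (1 + p1.1 + p2.1 + p3.1 + p4.1, p4.2)

def traverseNodeDFS (row col : Int) (m : List (List String)) (v : List (List Bool)) :
    Int × List (List Bool) :=
  travF m (countF v + 1) row col v

-- body of A's inner loop: `if visited[row][col]: continue; size = traverseNodeDFS(...); if size: ...`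
def scanA (m : List (List String)) (st : List (List Bool) × List Int) (row col : Int) :
    List (List Bool) × List Int :=
  if entryV st.1 row col = some true then st
  else
    let p := traverseNodeDFS row col m st.1
    if p.1 ≠ 0 then (p.2, st.2 ++ [p.1]) else (p.2, st.2)

def numOfIslandsDFS (grid : List (List String)) : List Int :=
  let visited0 := grid.map (fun row => row.map (fun _ => false))
  ((PySem.List.pyRange 0 (grid.length : Int) 1).foldl
    (fun st row =>
      (PySem.List.pyRange 0 ((grid.headD []).length : Int) 1).foldl
        (fun st col => scanA grid st row col) st)
    (visited0, ([] : List Int))).2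

-- ===== PORT B =====
-- the while-loop over the explicit stack; head of the list = top of the Python stack
def floodLoop (m : List (List String)) (stack : List (Int × Int)) (v : List (List Bool))
    (size : Int) : Int × List (List Bool) :=
  match stack with
  | [] => (size, v)
  | (i, j) :: rest =>
    if ¬(0 ≤ i ∧ i < (m.length : Int)) ∨ ¬(0 ≤ j ∧ j < ((m.headD []).length : Int)) then
      floodLoop m rest v size
    else
      match h : entryV v i j with
      | none => floodLoop m rest v size      -- Python raises IndexError here; excluded by Pre_
      | some true => floodLoop m rest v size
      | some false =>
        let v1 := setTrue v i j
        if cellAt m i j == "0" then floodLoop m rest v1 size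
        else
          floodLoop m ((i + 1, j) :: (i - 1, j) :: (i, j + 1) :: (i, j - 1) :: rest) v1 (size + 1)
termination_by (countF v, stack.length)
decreasing_by
  · exact Prod.Lex.right _ (by simp)
  · exact Prod.Lex.right _ (by simp)
  · exact Prod.Lex.right _ (by simp)
  · exact Prod.Lex.left _ _ (countF_setTrue_lt v i j h)
  · exact Prod.Lex.left _ _ (countF_setTrue_lt v i j h)

-- body of B's inner loop: run the stack flood fill from (row, col), append the size if nonzero
def scanB (m : List (List String)) (st : List (List Bool) × List Int) (row col : Int) :
    List (List Bool) × List Int :=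
  let p := floodLoop m [(row, col)] st.1 0
  if p.1 ≠ 0 then (p.2, st.2 ++ [p.1]) else (p.2, st.2)

def numOfIslandsDFS_alt (grid : List (List String)) : List Int :=
  let visited0 := grid.map (fun row => row.map (fun _ => false))
  ((PySem.List.pyRange 0 (grid.length : Int) 1).foldl
    (fun st row =>
      (PySem.List.pyRange 0 ((grid.headD []).length : Int) 1).foldl
        (fun st col => scanB grid st row col) st)
    (visited0, ([] : List Int))).2

-- ===== PRECONDITION & SPEC =====
-- Pre_ excludes only inputs where Python A raises IndexError: a row shorter than row 0
-- makes the scan access visited[row][col] past the row's end (B raises there as well).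
def Pre_numOfIslandsDFS (grid : List (List String)) : Prop :=
  ∀ row ∈ grid, (grid.headD []).length ≤ row.length
instance (grid : List (List String)) : Decidable (Pre_numOfIslandsDFS grid) := by
  unfold Pre_numOfIslandsDFS; infer_instance

def pvWitness_numOfIslandsDFS : List (List String) := [["1", "0"], ["1", "1"]]

def Spec_numOfIslandsDFS (grid : List (List String)) (out : List Int) : Prop :=
  out = numOfIslandsDFS_alt grid
instance (grid : List (List String)) (out : List Int) : Decidable (Spec_numOfIslandsDFS grid out) := by
  unfold Spec_numOfIslandsDFS; infer_instance

-- ===== CLAIM (what is proved, stated in full; the proofs are below) =====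
def Claim_equal_numOfIslandsDFS : Prop :=
  ∀ (grid : List (List String)), Dom_numOfIslandsDFS grid → Pre_numOfIslandsDFS grid →
    Spec_numOfIslandsDFS grid (numOfIslandsDFS grid)

-- ===== LEMMAS AND PROOFS =====

theorem count_set_true_le (l : List Bool) (k : Nat) :
    (l.set k true).count false ≤ l.count false := by
  induction l generalizing k with
  | nil => simp
  | cons a l ih =>
    cases k with
    | zero => simp [List.count_cons]
    | succ k => simpa [List.count_cons] using ih k

theorem countF_set_le (v : List (List Bool)) (n m : Nat) :
    countF (v.set n ((v.getD n []).set m true)) ≤ countF v := by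
  induction v generalizing n with
  | nil => simp
  | cons a v ih =>
    cases n with
    | zero =>
      simp only [List.getD_cons_zero, List.set_cons_zero, countF, List.map_cons, List.sum_cons]
      have := count_set_true_le a m
      omega
    | succ n =>
      simp only [List.getD_cons_succ, List.set_cons_succ, countF, List.map_cons, List.sum_cons]
      have := ih n
      simp only [countF] at this
      omega

theorem countF_setTrue_le (v : List (List Bool)) (i j : Int) :
    countF (setTrue v i j) ≤ countF v := by
  unfold setTrue
  split
  · exact countF_set_le v i.toNat j.toNat
  · exact le_rfl

theorem countF_travF_le (m : List (List String)) :
    ∀ (f : Nat) (i j : Int) (v : List (List Bool)), countF (travF m f i j v).2 ≤ countF v := by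
  intro f
  induction f with
  | zero => intro i j v; simp [travF]
  | succ f ih =>
    intro i j v
    simp only [travF]
    split
    · exact le_rfl
    · split
      · exact le_rfl
      · exact le_rfl
      · rename_i hE
        split
        · exact countF_setTrue_le v i j
        · calc countF (travF m f i (j - 1) (travF m f i (j + 1) (travF m f (i - 1) j (travF m f (i + 1) j (setTrue v i j)).2).2).2).2
              ≤ countF (travF m f i (j + 1) (travF m f (i - 1) j (travF m f (i + 1) j (setTrue v i j)).2).2).2 := ih _ _ _
            _ ≤ countF (travF m f (i - 1) j (travF m f (i + 1) j (setTrue v i j)).2).2 := ih _ _ _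
            _ ≤ countF (travF m f (i + 1) j (setTrue v i j)).2 := ih _ _ _
            _ ≤ countF (setTrue v i j) := ih _ _ _
            _ ≤ countF v := countF_setTrue_le v i j

theorem travF_congr (m : List (List String)) :
    ∀ (n : Nat) (v : List (List Bool)), countF v ≤ n →
      ∀ (f f' : Nat), countF v < f → countF v < f' → ∀ (i j : Int),
        travF m f i j v = travF m f' i j v := by
  intro n
  induction n with
  | zero =>
    intro v hv f f' hf hf' i j
    obtain ⟨g, rfl⟩ : ∃ g, f = g + 1 := ⟨f - 1, by omega⟩
    obtain ⟨g', rfl⟩ : ∃ g', f' = g' + 1 := ⟨f' - 1, by omega⟩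
    simp only [travF]
    split
    · rfl
    · split
      · rfl
      · rfl
      · rename_i hE
        exact absurd (countF_setTrue_lt v i j hE) (by omega)
  | succ n ih =>
    intro v hv f f' hf hf' i j
    obtain ⟨g, rfl⟩ : ∃ g, f = g + 1 := ⟨f - 1, by omega⟩
    obtain ⟨g', rfl⟩ : ∃ g', f' = g' + 1 := ⟨f' - 1, by omega⟩
    simp only [travF]
    split
    · rfl
    · split
      · rfl
      · rfl
      · rename_i hE
        split
        · rfl
        · have hv1 : countF (setTrue v i j) < countF v := countF_setTrue_lt v i j hE
          have h1 : travF m g (i + 1) j (setTrue v i j) = travF m g' (i + 1) j (setTrue v i j) :=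
            ih _ (by omega) g g' (by omega) (by omega) _ _
          rw [h1]
          have hm1 : countF (travF m g' (i + 1) j (setTrue v i j)).2 ≤ countF (setTrue v i j) :=
            countF_travF_le m _ _ _ _
          have h2 : travF m g (i - 1) j (travF m g' (i + 1) j (setTrue v i j)).2
                  = travF m g' (i - 1) j (travF m g' (i + 1) j (setTrue v i j)).2 :=
            ih _ (by omega) g g' (by omega) (by omega) _ _
          rw [h2]
          have hm2 : countF (travF m g' (i - 1) j (travF m g' (i + 1) j (setTrue v i j)).2).2
                   ≤ countF (setTrue v i j) :=
            le_trans (countF_travF_le m _ _ _ _) hm1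
          have h3 : travF m g i (j + 1) (travF m g' (i - 1) j (travF m g' (i + 1) j (setTrue v i j)).2).2
                  = travF m g' i (j + 1) (travF m g' (i - 1) j (travF m g' (i + 1) j (setTrue v i j)).2).2 :=
            ih _ (by omega) g g' (by omega) (by omega) _ _
          rw [h3]
          have hm3 : countF (travF m g' i (j + 1) (travF m g' (i - 1) j (travF m g' (i + 1) j (setTrue v i j)).2).2).2
                   ≤ countF (setTrue v i j) :=
            le_trans (countF_travF_le m _ _ _ _) hm2
          have h4 : travF m g i (j - 1) (travF m g' i (j + 1) (travF m g' (i - 1) j (travF m g' (i + 1) j (setTrue v i j)).2).2).2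
                  = travF m g' i (j - 1) (travF m g' i (j + 1) (travF m g' (i - 1) j (travF m g' (i + 1) j (setTrue v i j)).2).2).2 :=
            ih _ (by omega) g g' (by omega) (by omega) _ _
          rw [h4]

-- any adequate fuel computes traverseNodeDFS
theorem travF_eq_trav (m : List (List String)) (f : Nat) (v : List (List Bool)) (i j : Int)
    (hf : countF v < f) : travF m f i j v = traverseNodeDFS i j m v :=
  travF_congr m (countF v) v le_rfl f (countF v + 1) hf (by omega) i j

-- the key loop ↔ recursion correspondence: processing the top of the stack is exactly
-- one recursive DFS call, threaded through the visited state and the running size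
theorem flood_cons (m : List (List String)) :
    ∀ (n : Nat) (v : List (List Bool)), countF v ≤ n →
      ∀ (i j : Int) (rest : List (Int × Int)) (s : Int),
        floodLoop m ((i, j) :: rest) v s
          = floodLoop m rest (traverseNodeDFS i j m v).2 (s + (traverseNodeDFS i j m v).1) := by
  intro n
  induction n with
  | zero =>
    intro v hv i j rest s
    rw [floodLoop]
    simp only [traverseNodeDFS, travF]
    split
    · simp
    · split
      · rename_i hq
        simp [hq]
      · rename_i hq
        simp [hq]
      · rename_i hE
        exact absurd (countF_setTrue_lt v i j hE) (by omega)
  | succ n ih =>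
    intro v hv i j rest s
    rw [floodLoop]
    simp only [traverseNodeDFS, travF]
    split
    · simp
    · split
      · rename_i hq
        simp [hq]
      · rename_i hq
        simp [hq]
      · rename_i hE
        simp only [hE]
        have hv1 : countF (setTrue v i j) < countF v := countF_setTrue_lt v i j hE
        split_ifs with hw
        · simp
        · -- land cell: four stack pushes = the four recursive calls, in pop order
          set v1 := setTrue v i j with hv1def
          rw [ih v1 (by omega) (i + 1) j _ (s + 1)]
          set q1 := traverseNodeDFS (i + 1) j m v1 with hq1
          have hmq1 : countF q1.2 ≤ countF v1 := by
            rw [hq1]; exact countF_travF_le m _ _ _ _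
          rw [ih q1.2 (by omega) (i - 1) j _ _]
          set q2 := traverseNodeDFS (i - 1) j m q1.2 with hq2
          have hmq2 : countF q2.2 ≤ countF v1 := by
            rw [hq2]; exact le_trans (countF_travF_le m _ _ _ _) hmq1
          rw [ih q2.2 (by omega) i (j + 1) _ _]
          set q3 := traverseNodeDFS i (j + 1) m q2.2 with hq3
          have hmq3 : countF q3.2 ≤ countF v1 := by
            rw [hq3]; exact le_trans (countF_travF_le m _ _ _ _) hmq2
          rw [ih q3.2 (by omega) i (j - 1) _ _]
          set q4 := traverseNodeDFS i (j - 1) m q3.2 with hq4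
          -- identify A's fuel-(countF v) recursive calls with traverseNodeDFS
          rw [travF_eq_trav m (countF v) v1 (i + 1) j (by omega), ← hq1]
          rw [travF_eq_trav m (countF v) q1.2 (i - 1) j (by omega), ← hq2]
          rw [travF_eq_trav m (countF v) q2.2 i (j + 1) (by omega), ← hq3]
          rw [travF_eq_trav m (countF v) q3.2 i (j - 1) (by omega), ← hq4]
          congr 1
          omega

theorem flood_single (m : List (List String)) (v : List (List Bool)) (i j : Int) :
    floodLoop m [(i, j)] v 0 = traverseNodeDFS i j m v := by
  rw [flood_cons m (countF v) v le_rfl i j [] 0, floodLoop]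
  simp

-- a start cell that is already visited yields size 0 and an unchanged visited matrix
theorem trav_visited (m : List (List String)) (v : List (List Bool)) (i j : Int)
    (h : entryV v i j = some true) : traverseNodeDFS i j m v = (0, v) := by
  simp only [traverseNodeDFS, travF]
  split
  · rfl
  · rw [h]

theorem scan_eq (m : List (List String)) (st : List (List Bool) × List Int) (r c : Int) :
    scanA m st r c = scanB m st r c := by
  unfold scanA scanB
  rw [flood_single]
  by_cases hE : entryV st.1 r c = some true
  · rw [if_pos hE, trav_visited m st.1 r c hE]
    simp
  · rw [if_neg hE]

-- ===== VERDICT (by name: the statement is the Claim_ definition above) =====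
theorem numOfIslandsDFS_spec : Claim_equal_numOfIslandsDFS := by
  intro grid _ _
  unfold Spec_numOfIslandsDFS numOfIslandsDFS numOfIslandsDFS_alt
  have h : scanA grid = scanB grid :=
    funext fun st => funext fun r => funext fun c => scan_eq grid st r c
  rw [h]
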